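-- pv_equiv track=rewrite | github.com/Matvey2009/MFTI | Курс 3/Домашние работы/3.1.4. home_data_3.1.4.py | winners
-- ===== SOURCE A (Python) =====
-- def winners(a, b, c):
-- 	result = ''
-- 	for i in list(sorted(set(a.split()).intersection(set(b.split()), set(c.split())))):
-- 		result += " " + i
-- 	if result:
-- 		return result[1:]
-- 	else:
-- 		return "Все три задачи никто не решил"
-- ===== SOURCE B (Python) =====
-- def winners(a, b, c):
--     counts = {}
--     for s in (a, b, c):
--         for w in set(s.split()):
--             counts[w] = counts.get(w, 0) + 1
--     common = sorted(w for w, n in counts.items() if n == 3)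
--     return ' '.join(common) if common else "Все три задачи никто не решил"
-- ===== Notes on version B (the rewrite author's own statement) =====
-- stated objective: alternative
-- what changed: Replaces A's pairwise set.intersection with a tally dict that counts each word once per string and keeps words with count 3.
import Mathlib
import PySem

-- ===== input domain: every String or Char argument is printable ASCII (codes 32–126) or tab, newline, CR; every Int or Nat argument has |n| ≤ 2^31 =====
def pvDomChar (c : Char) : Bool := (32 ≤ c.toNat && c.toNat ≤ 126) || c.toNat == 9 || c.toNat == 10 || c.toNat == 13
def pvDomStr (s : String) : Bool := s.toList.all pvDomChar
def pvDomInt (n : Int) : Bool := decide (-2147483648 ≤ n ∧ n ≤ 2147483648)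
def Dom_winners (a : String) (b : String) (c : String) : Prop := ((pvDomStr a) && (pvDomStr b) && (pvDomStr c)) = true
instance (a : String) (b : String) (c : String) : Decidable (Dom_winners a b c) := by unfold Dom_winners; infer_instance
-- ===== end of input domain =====

-- B replaces A's pairwise set intersection by one per-string-deduplicated tally dict, keeping words counted in all three strings (alternative decomposition, same cost).

-- ===== PORT A =====
-- result accumulates 'result + " " + i' as a List Char; result[1:] is drop 1 (exact for a nonnegative slice start)
def winners (a : String) (b : String) (c : String) : String :=
  let inter := PySem.Set.inter (PySem.Set.inter (PySem.Set.ofList (PySem.Str.split₀ a))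
                  (PySem.Set.ofList (PySem.Str.split₀ b))) (PySem.Set.ofList (PySem.Str.split₀ c))
  let result := (PySem.List.sorted inter (fun x => x) false).foldl
                  (fun acc i => acc ++ ' ' :: i.toList) ([] : List Char)
  if result ≠ [] then String.ofList (result.drop 1) else "Все три задачи никто не решил"

-- ===== PORT B =====
def winners_alt (a : String) (b : String) (c : String) : String :=
  let counts := [a, b, c].foldl
      (fun d s => (PySem.Set.ofList (PySem.Str.split₀ s)).foldl
          (fun d w => d.insert w (d.getD w 0 + 1)) d)
      (PySem.Dict.empty : PySem.Dict String Int)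
  let common := PySem.List.sorted ((counts.items.filter (fun p => p.2 == (3 : Int))).map Prod.fst)
                  (fun x => x) false
  if common ≠ [] then PySem.Str.join " " common else "Все три задачи никто не решил"

-- ===== PRECONDITION & SPEC =====
def Spec_winners (a : String) (b : String) (c : String) (out : String) : Prop := out = winners_alt a b c
instance (a : String) (b : String) (c : String) (out : String) : Decidable (Spec_winners a b c out) := by unfold Spec_winners; infer_instance

-- ===== CLAIM (what is proved, stated in full; the proofs are below) =====
def Claim_equal_winners : Prop := ∀ (a : String) (b : String) (c : String), Dom_winners a b c → Spec_winners a b c (winners a b c)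

-- ===== LEMMAS AND PROOFS =====

-- ' '.join of a nonempty list equals the flatMap that prepends a space to each word, minus the leading space
theorem join_space_eq_flatMap (t : List (List Char)) (x : List Char) :
    PySem.Chars.join [' '] (x :: t) = x ++ t.flatMap (fun i => ' ' :: i) := by
  induction t generalizing x with
  | nil => simp [PySem.Chars.join_singleton]
  | cons y t ih =>
      rw [PySem.Chars.join_cons_cons, ih y]
      simp

-- counts in B is Counter(set(a.split()) ++ set(b.split()) ++ set(c.split()))
theorem counts_eq_counter (a b c : String) :
    [a, b, c].foldl
      (fun d s => (PySem.Set.ofList (PySem.Str.split₀ s)).foldl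
          (fun d w => d.insert w (d.getD w 0 + 1)) d)
      (PySem.Dict.empty : PySem.Dict String Int)
    = PySem.Dict.counter (PySem.Set.ofList (PySem.Str.split₀ a) ++ PySem.Set.ofList (PySem.Str.split₀ b) ++ PySem.Set.ofList (PySem.Str.split₀ c)) := by
  rw [← PySem.Dict.foldl_insert_getD_add_one_eq_counter]
  simp [List.foldl, List.foldl_append]

-- count of a word in the concatenation of the three deduplicated word lists is 3 iff it occurs in all three
theorem count_three_iff (sa sb sc : List String) (hna : sa.Nodup) (hnb : sb.Nodup) (hnc : sc.Nodup) (w : String) :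
    (List.count w (sa ++ sb ++ sc) = 3) ↔ (w ∈ sa ∧ w ∈ sb ∧ w ∈ sc) := by
  rw [List.count_append, List.count_append]
  by_cases ha : w ∈ sa <;> by_cases hb : w ∈ sb <;> by_cases hc : w ∈ sc <;>
    simp [List.count_eq_one_of_mem, List.count_eq_zero_of_not_mem, *]

-- the two candidate word lists (A's intersection, B's count==3 filter) are permutations of each other
theorem candidates_perm (a b c : String) :
    let sa := PySem.Set.ofList (PySem.Str.split₀ a)
    let sb := PySem.Set.ofList (PySem.Str.split₀ b)
    let sc := PySem.Set.ofList (PySem.Str.split₀ c)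
    (PySem.Set.inter (PySem.Set.inter sa sb) sc).Perm
      (((PySem.Dict.counter (sa ++ sb ++ sc)).items.filter (fun p => p.2 == (3 : Int))).map Prod.fst) := by
  intro sa sb sc
  have hna : sa.Nodup := PySem.Set.nodup_ofList _
  have hnb : sb.Nodup := PySem.Set.nodup_ofList _
  have hnc : sc.Nodup := PySem.Set.nodup_ofList _
  have hitems := PySem.Dict.items_counter (sa ++ sb ++ sc)
  rw [hitems, List.filter_map, List.map_map]
  have hmapfst : (Prod.fst ∘ fun k => (k, (List.count k (sa ++ sb ++ sc) : Int))) = id := rfl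
  rw [hmapfst, List.map_id]
  apply (List.perm_ext_iff_of_nodup _ _).mpr
  · intro w
    rw [PySem.Set.mem_inter, PySem.Set.mem_inter, List.mem_filter]
    constructor
    · rintro ⟨⟨h1, h2⟩, h3⟩
      have hcount := (count_three_iff sa sb sc hna hnb hnc w).mpr ⟨h1, h2, h3⟩
      constructor
      · rw [PySem.Set.mem_ofList]; simp [h1]
      · simp only [Function.comp]
        have hc := hcount
        rw [List.count_append, List.count_append] at hc
        simp only [beq_iff_eq]
        omega
    · rintro ⟨_, h2⟩
      simp only [Function.comp] at h2
      have hc3 : (List.count w (sa ++ sb ++ sc) : Int) = 3 := by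
        simpa using h2
      have : List.count w (sa ++ sb ++ sc) = 3 := by exact_mod_cast hc3
      have := (count_three_iff sa sb sc hna hnb hnc w).mp this
      exact ⟨⟨this.1, this.2.1⟩, this.2.2⟩
  · exact PySem.Set.nodup_inter _ _ (PySem.Set.nodup_inter _ _ hna)
  · exact ((PySem.Set.nodup_ofList _).filter _)

-- ===== VERDICT (by name: the statement is the Claim_ definition above) =====
theorem winners_spec : Claim_equal_winners := by
  intro a b c _
  show winners a b c = winners_alt a b c
  simp only [winners, winners_alt, counts_eq_counter]
  have hperm := candidates_perm a b c
  simp only at hperm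
  have hsorted := (PySem.List.sorted_id_eq_sorted_id_iff_perm _ _).mpr hperm
  rw [← hsorted]
  set L := PySem.List.sorted (PySem.Set.inter (PySem.Set.inter (PySem.Set.ofList (PySem.Str.split₀ a)) (PySem.Set.ofList (PySem.Str.split₀ b))) (PySem.Set.ofList (PySem.Str.split₀ c))) (fun x => x) false with hL
  rw [PySem.List.foldl_append_eq_flatMap]
  cases hLc : L with
  | nil => simp
  | cons x t =>
      have hne : (x :: t).flatMap (fun i => ' ' :: i.toList) ≠ [] := by simp [List.flatMap]
      simp only [List.nil_append, hne, if_pos, ne_eq, not_false_iff, List.cons_ne_nil, if_pos]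
      apply String.ext
      rw [PySem.Str.toList_join]
      have hsep : (" " : String).toList = [' '] := rfl
      rw [hsep, List.map_cons, join_space_eq_flatMap]
      simp [List.flatMap_cons, List.flatMap_map]
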